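-- pv_equiv track=rewrite | github.com/byuacm/w16-programming-contest-solutions | Naming Conventions/solution.py | buildFrontMatrix
-- ===== SOURCE A (Python) =====
-- def buildBlankMatrix(n):
--     matrix = []
--     for i in range(n):
--         matrix.append([])
--         for j in range(n):
--             matrix[i].append(0)
--     return matrix
--
-- def buildFrontMatrix(characters):
--     size = (characters - 1) * 2
--     matrix = buildBlankMatrix(size)
--     for i in range(size - 1):
--         matrix[i][i+1] = 1
--
--     for i in range(characters - 1):
--         for j in range(2*i):
--             matrix[j][2*i] = 1
--     return matrix
-- ===== SOURCE B (Python) =====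
-- def buildFrontMatrix(characters):
--     size = (characters - 1) * 2
--     return [[1 if c == r + 1 or (c % 2 == 0 and r < c) else 0 for c in range(size)]
--             for r in range(size)]
-- ===== Notes on version B (the rewrite author's own statement) =====
-- stated objective: simpler
-- what changed: Replaces A's blank-matrix construction plus two separate sparse mutation passes (superdiagonal fill and per-column even-column fill) with a single closed-form per-cell predicate evaluated over the whole grid.
import Mathlib
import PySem

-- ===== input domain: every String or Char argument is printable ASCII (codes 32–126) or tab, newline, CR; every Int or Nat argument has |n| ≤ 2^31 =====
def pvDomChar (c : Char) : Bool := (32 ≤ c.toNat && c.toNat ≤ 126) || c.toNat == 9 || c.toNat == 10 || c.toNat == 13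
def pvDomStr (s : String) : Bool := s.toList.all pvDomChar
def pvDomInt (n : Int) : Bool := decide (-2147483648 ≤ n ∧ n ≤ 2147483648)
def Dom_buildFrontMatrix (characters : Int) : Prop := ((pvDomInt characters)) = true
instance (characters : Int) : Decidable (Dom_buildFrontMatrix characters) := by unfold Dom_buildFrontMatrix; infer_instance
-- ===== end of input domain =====

-- B replaces A's blank-matrix build plus two separate sparse mutation passes with a
-- single per-cell closed-form predicate over the grid (objective: simpler).

-- ===== PORT A =====
-- Every index written to comes from pyRange starting at 0 and is in range
-- (i < n, i+1 ≤ size-1 < size, j < 2*i < size, 2*i < size), so `.toNat` + modify/set is exact here.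
def buildBlankMatrix (n : Int) : List (List Int) :=
  (PySem.List.pyRange 0 n 1).foldl (fun matrix i =>
    (PySem.List.pyRange 0 n 1).foldl
      (fun m _j => m.modify i.toNat (fun row => row ++ [0])) (matrix ++ [[]])) []

def buildFrontMatrix (characters : Int) : List (List Int) :=
  let size := (characters - 1) * 2
  let matrix := buildBlankMatrix size
  let matrix := (PySem.List.pyRange 0 (size - 1) 1).foldl
    (fun m i => m.modify i.toNat (fun row => row.set (i + 1).toNat 1)) matrix
  (PySem.List.pyRange 0 (characters - 1) 1).foldl
    (fun m i => (PySem.List.pyRange 0 (2 * i) 1).foldl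
      (fun m' j => m'.modify j.toNat (fun row => row.set (2 * i).toNat 1)) m) matrix

-- ===== PORT B =====
def buildFrontMatrix_alt (characters : Int) : List (List Int) :=
  let size := (characters - 1) * 2
  (PySem.List.pyRange 0 size 1).map (fun r =>
    (PySem.List.pyRange 0 size 1).map (fun c =>
      if c = r + 1 ∨ (PySem.Int.mod c 2 = 0 ∧ r < c) then 1 else 0))

-- ===== PRECONDITION & SPEC =====
def Spec_buildFrontMatrix (characters : Int) (out : List (List Int)) : Prop := out = buildFrontMatrix_alt characters
instance (characters : Int) (out : List (List Int)) : Decidable (Spec_buildFrontMatrix characters out) := by unfold Spec_buildFrontMatrix; infer_instance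

-- ===== CLAIM (what is proved, stated in full; the proofs are below) =====
def Claim_equal_buildFrontMatrix : Prop := ∀ (characters : Int), Dom_buildFrontMatrix characters → Spec_buildFrontMatrix characters (buildFrontMatrix characters)

-- ===== LEMMAS AND PROOFS =====

/-- `pyRange 0 b 1` is `List.range` under the cast. -/
theorem pvRange_eq (b : Int) :
    PySem.List.pyRange 0 b 1 = (List.range b.toNat).map (Nat.cast : Nat → Int) := by
  rw [PySem.List.pyRange_one]
  simp

/-- Functional view of an n×n matrix. -/
def pvMat (n : Nat) (f : Nat → Nat → Int) : List (List Int) :=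
  (List.range n).map (fun r => (List.range n).map (f r))

theorem pvMat_congr {n : Nat} {f g : Nat → Nat → Int}
    (h : ∀ r < n, ∀ c < n, f r c = g r c) : pvMat n f = pvMat n g := by
  unfold pvMat
  refine List.map_congr_left (fun r hr => ?_)
  exact List.map_congr_left (fun c hc => h r (List.mem_range.mp hr) c (List.mem_range.mp hc))

theorem pvModify_last (L : List (List Int)) (row : List Int) (f : List Int → List Int) :
    (L ++ [row]).modify L.length f = L ++ [f row] := by
  induction L with
  | nil => simp [List.modify]
  | cons a t ih => simpa [List.modify] using ih

theorem pvInner_fill {α : Type} (l : List α) :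
    ∀ (L : List (List Int)) (row : List Int),
    l.foldl (fun m (_ : α) => m.modify L.length (fun r => r ++ [0])) (L ++ [row])
      = L ++ [row ++ List.replicate l.length 0] := by
  induction l with
  | nil => intro L row; simp
  | cons a t ih =>
    intro L row
    simp only [List.foldl_cons, pvModify_last]
    rw [ih L (row ++ [0])]
    simp [List.append_assoc, List.replicate_succ]

theorem pvBlank_loop {α : Type} (l : List α) (k : Nat) :
    ((List.range k).map (Nat.cast : Nat → Int)).foldl (fun matrix i =>
      l.foldl
        (fun m _j => m.modify i.toNat (fun row => row ++ [0])) (matrix ++ ([[]] : List (List Int)))) []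
      = List.replicate k (List.replicate l.length (0 : Int)) := by
  induction k with
  | zero => simp
  | succ k ih =>
    rw [List.range_succ, List.map_append, List.foldl_append, ih]
    simp only [List.map_cons, List.map_nil, List.foldl_cons, List.foldl_nil]
    have ht : ((k : Int)).toNat = k := rfl
    have hl : (List.replicate k (List.replicate l.length (0 : Int))).length = k := by simp
    have step := pvInner_fill l (List.replicate k (List.replicate l.length 0)) ([] : List Int)
    rw [hl] at step
    rw [ht]
    refine step.trans ?_
    simp [List.replicate_succ']

theorem pvBlank_eq (n : Int) :
    buildBlankMatrix n = pvMat n.toNat (fun _ _ => 0) := by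
  unfold buildBlankMatrix
  rw [pvRange_eq n,
    pvBlank_loop ((List.range n.toNat).map (Nat.cast : Nat → Int)) n.toNat]
  unfold pvMat
  simp [List.map_const']

theorem pvMat_set (n : Nat) (f : Nat → Nat → Int) (i j : Nat) (_hi : i < n) (_hj : j < n)
    (v : Int) :
    (pvMat n f).modify i (fun row => row.set j v)
      = pvMat n (fun r c => if r = i ∧ c = j then v else f r c) := by
  apply List.ext_getElem
  · simp [pvMat]
  · intro r h1 h2
    have hr : r < n := by simpa [pvMat] using h2
    rw [List.getElem_modify]
    by_cases hri : i = r
    · subst hri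
      rw [if_pos rfl]
      simp only [pvMat, List.getElem_map, List.getElem_range]
      apply List.ext_getElem
      · simp
      · intro c hc1 hc2
        rw [List.getElem_set]
        by_cases hcj : j = c
        · subst hcj; simp
        · have hcj' : ¬ c = j := fun h => hcj h.symm
          rw [if_neg hcj]
          simp [hcj']
    · rw [if_neg hri]
      simp only [pvMat, List.getElem_map, List.getElem_range]
      refine List.map_congr_left (fun c _ => ?_)
      have : ¬ (r = i ∧ c = j) := fun h => hri h.1.symm
      simp [this]

theorem pvLoop1 (n : Nat) (f : Nat → Nat → Int) :
    ∀ k, k < n →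
    ((List.range k).map (Nat.cast : Nat → Int)).foldl
      (fun m i => m.modify i.toNat (fun row => row.set (i + 1).toNat 1)) (pvMat n f)
      = pvMat n (fun r c => if r < k ∧ c = r + 1 then 1 else f r c) := by
  intro k
  induction k with
  | zero =>
    intro _
    simp only [List.range_zero, List.map_nil, List.foldl_nil]
    exact pvMat_congr (by intro r _ c _; simp)
  | succ k ih =>
    intro hk
    rw [List.range_succ, List.map_append, List.foldl_append, ih (by omega)]
    simp only [List.map_cons, List.map_nil, List.foldl_cons, List.foldl_nil]
    have h1 : ((k : Int)).toNat = k := rfl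
    have h2 : (((k : Int)) + 1).toNat = k + 1 := rfl
    rw [h1, h2, pvMat_set n _ k (k + 1) (by omega) hk]
    exact pvMat_congr (by intro r _ c _; split_ifs <;> omega)

theorem pvColFill (n : Nat) (f : Nat → Nat → Int) (col : Nat) (hcol : col < n) :
    ∀ k, k ≤ n →
    ((List.range k).map (Nat.cast : Nat → Int)).foldl
      (fun m' j => m'.modify j.toNat (fun row => row.set col 1)) (pvMat n f)
      = pvMat n (fun r c => if r < k ∧ c = col then 1 else f r c) := by
  intro k
  induction k with
  | zero =>
    intro _
    simp only [List.range_zero, List.map_nil, List.foldl_nil]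
    exact pvMat_congr (by intro r _ c _; simp)
  | succ k ih =>
    intro hk
    rw [List.range_succ, List.map_append, List.foldl_append, ih (by omega)]
    simp only [List.map_cons, List.map_nil, List.foldl_cons, List.foldl_nil]
    have h1 : ((k : Int)).toNat = k := rfl
    rw [h1, pvMat_set n _ k col (by omega) hcol]
    exact pvMat_congr (by intro r _ c _; split_ifs <;> omega)

theorem pvLoop2 (m : Nat) (f : Nat → Nat → Int) :
    ∀ t, t ≤ m →
    ((List.range t).map (Nat.cast : Nat → Int)).foldl
      (fun mtx i => (PySem.List.pyRange 0 (2 * i) 1).foldl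
        (fun m' j => m'.modify j.toNat (fun row => row.set (2 * i).toNat 1)) mtx)
      (pvMat (2 * m) f)
      = pvMat (2 * m) (fun r c => if c % 2 = 0 ∧ c < 2 * t ∧ r < c then 1 else f r c) := by
  intro t
  induction t with
  | zero =>
    intro _
    simp only [List.range_zero, List.map_nil, List.foldl_nil]
    exact pvMat_congr (by intro r _ c _; simp)
  | succ t ih =>
    intro ht
    rw [List.range_succ, List.map_append, List.foldl_append, ih (by omega)]
    simp only [List.map_cons, List.map_nil, List.foldl_cons, List.foldl_nil]
    have hR : PySem.List.pyRange 0 (2 * (t : Int)) 1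
        = (List.range (2 * t)).map (Nat.cast : Nat → Int) := by
      rw [pvRange_eq, show ((2 * (t : Int))).toNat = 2 * t from by omega]
    have hcol : ((2 * (t : Int))).toNat = 2 * t := by omega
    rw [hR]
    simp only [hcol]
    rw [pvColFill (2 * m) _ (2 * t) (by omega) (2 * t) (by omega)]
    exact pvMat_congr (by intro r _ c _; split_ifs <;> omega)

theorem pvMain (characters : Int) (h2 : 2 ≤ characters) :
    buildFrontMatrix characters = buildFrontMatrix_alt characters := by
  have hA : buildFrontMatrix characters
      = (PySem.List.pyRange 0 (characters - 1) 1).foldl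
          (fun m i => (PySem.List.pyRange 0 (2 * i) 1).foldl
            (fun m' j => m'.modify j.toNat (fun row => row.set (2 * i).toNat 1)) m)
          ((PySem.List.pyRange 0 ((characters - 1) * 2 - 1) 1).foldl
            (fun m i => m.modify i.toNat (fun row => row.set (i + 1).toNat 1))
            (buildBlankMatrix ((characters - 1) * 2))) := rfl
  have hB : buildFrontMatrix_alt characters
      = (PySem.List.pyRange 0 ((characters - 1) * 2) 1).map (fun r =>
          (PySem.List.pyRange 0 ((characters - 1) * 2) 1).map (fun c =>
            if c = r + 1 ∨ (PySem.Int.mod c 2 = 0 ∧ r < c) then 1 else 0)) := rfl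
  rw [hA, hB]
  have hmn : ((characters - 1)).toNat ≥ 1 := by omega
  have hn : ((characters - 1) * 2).toNat = 2 * (characters - 1).toNat := by omega
  rw [pvBlank_eq, hn]
  rw [show PySem.List.pyRange 0 ((characters - 1) * 2 - 1) 1
        = (List.range (2 * (characters - 1).toNat - 1)).map (Nat.cast : Nat → Int) by
      rw [pvRange_eq, show ((characters - 1) * 2 - 1).toNat = 2 * (characters - 1).toNat - 1 from by omega]]
  rw [pvLoop1 (2 * (characters - 1).toNat) _ (2 * (characters - 1).toNat - 1) (by omega)]
  rw [show PySem.List.pyRange 0 (characters - 1) 1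
        = (List.range ((characters - 1).toNat)).map (Nat.cast : Nat → Int) by rw [pvRange_eq]]
  rw [pvLoop2 ((characters - 1).toNat) _ ((characters - 1).toNat) (le_refl _)]
  rw [pvRange_eq ((characters - 1) * 2), hn]
  rw [show (List.map (fun r =>
        List.map (fun c => if c = r + 1 ∨ PySem.Int.mod c 2 = 0 ∧ r < c then (1 : Int) else 0)
          (List.map (Nat.cast : Nat → Int) (List.range (2 * (characters - 1).toNat))))
        (List.map (Nat.cast : Nat → Int) (List.range (2 * (characters - 1).toNat))))
      = pvMat (2 * (characters - 1).toNat) (fun r c =>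
          if (c : Int) = (r : Int) + 1 ∨ (PySem.Int.mod (c : Int) 2 = 0 ∧ (r : Int) < (c : Int))
          then 1 else 0) by
    simp [pvMat, List.map_map, Function.comp]]
  apply pvMat_congr
  intro r hr c hc
  have hmod : PySem.Int.mod ((c : Nat) : Int) 2 = ((c % 2 : Nat) : Int) := by
    unfold PySem.Int.mod
    rw [Int.fmod_eq_emod]
    simp
  rw [hmod]
  split_ifs <;> omega

-- ===== VERDICT (by name: the statement is the Claim_ definition above) =====
theorem buildFrontMatrix_spec : Claim_equal_buildFrontMatrix := by
  intro characters _
  unfold Spec_buildFrontMatrix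
  by_cases h : 2 ≤ characters
  · exact pvMain characters h
  · -- characters ≤ 1: size ≤ 0, every pyRange is empty, both sides are []
    have e1 : PySem.List.pyRange 0 ((characters - 1) * 2) 1 = [] :=
      PySem.List.pyRange_one_eq_nil (by omega)
    have e2 : PySem.List.pyRange 0 ((characters - 1) * 2 - 1) 1 = [] :=
      PySem.List.pyRange_one_eq_nil (by omega)
    have e3 : PySem.List.pyRange 0 (characters - 1) 1 = [] :=
      PySem.List.pyRange_one_eq_nil (by omega)
    simp [buildFrontMatrix, buildFrontMatrix_alt, buildBlankMatrix, e1, e2, e3]
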